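-- pv_equiv track=rewrite | github.com/shakyasaijal/Google-Foobar-Challenge | re-id.py | solution
-- ===== SOURCE A (Python) =====
-- def solution(n):
--     if n < 0 or n > 10000:
--         return 0
--
--     prime_numbers = ""
--     for x in range(1, n+100):
--         if x > 1:
--             for i in range(2, x):
--                 if(x % i == 0):
--                     break
--             else:
--                 prime_numbers += str(x)
--
--     return prime_numbers[n:n+5]
-- ===== SOURCE B (Python) =====
-- def solution(n):
--     if n < 0 or n > 10000:
--         return ''
--     limit = n + 100
--     sieve = [True] * limit
--     for p in range(2, limit):
--         for q in range(p * p, limit, p):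
--             sieve[q] = False
--     digits = ''.join(str(x) for x in range(2, limit) if sieve[x])
--     return digits[n:n+5]
-- ===== Notes on version B (the rewrite author's own statement) =====
-- stated objective: faster
-- what changed: Replaces per-number trial division over all smaller numbers with a multiple-marking sieve: a boolean table of size n+100 is filled once by striking out multiples q = p*p, p*p+p, ... of each p, and the prime-digit string is joined in one pass.
-- outside the precondition, e.g. on solution(-1): A returns 0, B returns ''; on solution(10001): A returns 0, B returns ''
import Mathlib
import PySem

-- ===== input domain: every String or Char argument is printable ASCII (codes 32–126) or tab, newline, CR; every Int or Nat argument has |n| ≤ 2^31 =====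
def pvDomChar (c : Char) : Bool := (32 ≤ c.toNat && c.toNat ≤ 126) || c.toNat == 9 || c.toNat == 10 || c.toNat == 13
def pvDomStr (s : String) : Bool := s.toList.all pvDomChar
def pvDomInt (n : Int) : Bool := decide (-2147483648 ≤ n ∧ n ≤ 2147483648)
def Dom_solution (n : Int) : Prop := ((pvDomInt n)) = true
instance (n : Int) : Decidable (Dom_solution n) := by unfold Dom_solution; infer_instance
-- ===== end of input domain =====

-- B replaces A's per-number trial division with a multiple-marking sieve filled once; equivalence is proved on 0 ≤ n ≤ 10000, where A returns a string.

-- ===== PORT A =====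
-- inner 'for i in range(2, x): if x % i == 0: break' — iterated lazily like Python's
-- range (i = 2, 3, …, stop before x), returning true exactly when the break is taken
def pvTrialLoop (x i : Int) : Bool :=
  if i < x then
    if PySem.Int.mod x i == 0 then true else pvTrialLoop x (i + 1)
  else false
termination_by (x - i).toNat
decreasing_by omega

-- A's strings are ported on the List Char side (PySem.Str functions are defined there):
-- prime_numbers += str(x) is acc ++ toChars x; the for/else appends when no break fired.
def solution (n : Int) : String :=
  if n < 0 || n > 10000 then "" -- Python returns the int 0 here (not a String); excluded by Pre_solution
  else
    String.ofList (PySem.List.slice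
      ((PySem.List.pyRange 1 (n + 100) 1).foldl (fun acc x =>
        if x > 1 then
          if pvTrialLoop x 2 then acc
          else acc ++ PySem.Int.toChars x
        else acc) [])
      (some n) (some (n + 5)))

-- ===== PORT B =====
-- sieve = [True]*(n+100) mutated in place: ported as an Array Bool threaded through the
-- two nested marking folds; every written index q = p*p, p*p+p, … and every read index x
-- is nonnegative and < n+100, so setIfInBounds / getD are exact for Python's sieve[q]=False
-- and sieve[x]; ''.join(generator) is Chars.join [] over filter+map.
def pvSieve (n : Int) : Array Bool :=
  (PySem.List.pyRange 2 (n + 100) 1).foldl (fun s p =>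
    (PySem.List.pyRange (p * p) (n + 100) p).foldl
      (fun s q => s.setIfInBounds q.toNat false) s)
    (Array.replicate (n + 100).toNat true)

-- the membership test sieve[x] (index nonnegative and in range here)
def pvKeep (sieve : Array Bool) (x : Int) : Bool := sieve.getD x.toNat true

def solution_alt (n : Int) : String :=
  if n < 0 || n > 10000 then ""
  else
    String.ofList (PySem.List.slice
      (PySem.Chars.join []
        (((PySem.List.pyRange 2 (n + 100) 1).filter
            (pvKeep (pvSieve n))).map PySem.Int.toChars))
      (some n) (some (n + 5)))

-- ===== PRECONDITION & SPEC =====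
-- Pre_ excludes n < 0 and n > 10000: there the Python A returns the int 0, which is not a value of the declared String result type.
def Pre_solution (n : Int) : Prop := 0 ≤ n ∧ n ≤ 10000
instance (n : Int) : Decidable (Pre_solution n) := by unfold Pre_solution; infer_instance
def pvWitness_solution : Int := (3)
def Spec_solution (n : Int) (out : String) : Prop := out = solution_alt n
instance (n : Int) (out : String) : Decidable (Spec_solution n out) := by unfold Spec_solution; infer_instance

-- ===== CLAIM (what is proved, stated in full; the proofs are below) =====
def Claim_equal_solution : Prop := ∀ (n : Int), Dom_solution n → Pre_solution n → Spec_solution n (solution n)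

-- ===== LEMMAS AND PROOFS =====

-- the lazy trial loop is the 'any' of its iteration space
lemma pvTrialLoop_eq_any (x i : Int) :
    pvTrialLoop x i = (PySem.List.pyRange i x 1).any (fun j => PySem.Int.mod x j == 0) := by
  by_cases h : i < x
  · rw [pvTrialLoop, if_pos h, PySem.List.pyRange_one_cons h, List.any_cons]
    by_cases hm : PySem.Int.mod x i == 0
    · simp [hm]
    · simp only [hm, Bool.false_or]
      exact pvTrialLoop_eq_any x (i + 1)
  · rw [pvTrialLoop, if_neg h, PySem.List.pyRange_one_eq_nil (by omega)]
    rfl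
termination_by (x - i).toNat
decreasing_by omega

-- ''.join with empty separator is flatten.
lemma join_nil_eq_flatten (ls : List (List Char)) : PySem.Chars.join [] ls = ls.flatten := by
  match ls with
  | [] => simp [PySem.Chars.join_nil]
  | [p] => simp [PySem.Chars.join_singleton]
  | p :: q :: rest =>
      rw [PySem.Chars.join_cons_cons]
      simp [join_nil_eq_flatten (q :: rest)]

-- flatten of a filtered map, as a flatMap with an empty piece on dropped elements
lemma flatten_map_filter {α β : Type} (l : List α) (p : α → Bool) (f : α → List β) :
    ((l.filter p).map f).flatten = l.flatMap (fun x => if p x then f x else []) := by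
  induction l with
  | nil => simp
  | cons a l ih =>
      rw [List.filter_cons]
      by_cases h : p a <;> simp [h, ih]

-- the array sieve, moved to its toList
lemma pvSieve_toList (n : Int) :
    (pvSieve n).toList =
      (PySem.List.pyRange 2 (n + 100) 1).foldl (fun s p =>
        (PySem.List.pyRange (p * p) (n + 100) p).foldl
          (fun s q => s.set q.toNat false) s)
        (List.replicate (n + 100).toNat true) := by
  unfold pvSieve
  rw [← Array.toList_replicate]
  generalize (Array.replicate (n + 100).toNat true) = a
  generalize (PySem.List.pyRange 2 (n + 100) 1) = ps
  induction ps generalizing a with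
  | nil => rfl
  | cons p ps ih =>
      rw [List.foldl_cons, List.foldl_cons, ih]
      congr 1
      generalize (PySem.List.pyRange (p * p) (n + 100) p) = qs
      induction qs generalizing a with
      | nil => rfl
      | cons q qs ihq =>
          rw [List.foldl_cons, List.foldl_cons, ihq, Array.toList_setIfInBounds]

-- the inner marking fold: value read back at an in-range index
lemma getD_foldl_set (qs : List Int) (s : List Bool) (x : Nat)
    (hq : ∀ q ∈ qs, 0 ≤ q) (hx : x < s.length) :
    ((qs.foldl (fun s q => s.set q.toNat false) s).getD x true) =
      if (x : Int) ∈ qs then false else s.getD x true := by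
  induction qs generalizing s with
  | nil => simp
  | cons q qs ih =>
      have hq0 : 0 ≤ q := hq q (by simp)
      rw [List.foldl_cons,
        ih (s.set q.toNat false) (fun q' hq' => hq q' (List.mem_cons_of_mem _ hq')) (by simpa using hx)]
      by_cases hmem : (x : Int) ∈ qs
      · simp [hmem]
      · by_cases hqx : q = (x : Int)
        · have h2 : q.toNat = x := by omega
          simp [hmem, hqx, List.getD_eq_getElem?_getD, hx]
        · have hne : q.toNat ≠ x := by omega
          simp [hmem, Ne.symm hqx, List.getD_eq_getElem?_getD, hne]

lemma length_foldl_set (qs : List Int) (s : List Bool) :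
    (qs.foldl (fun s q => s.set q.toNat false) s).length = s.length := by
  induction qs generalizing s with
  | nil => rfl
  | cons q qs ih => simp [ih]

-- the whole sieve fold, read back at an in-range index
lemma getD_sieve_fold (ps : List Int) (limit : Int) (s : List Bool) (x : Nat)
    (hp : ∀ p ∈ ps, 2 ≤ p) (hx : x < s.length) :
    (((ps.foldl (fun s p =>
        (PySem.List.pyRange (p * p) limit p).foldl (fun s q => s.set q.toNat false) s) s)).getD x true) =
      if ∃ p ∈ ps, (x : Int) ∈ PySem.List.pyRange (p * p) limit p then false else s.getD x true := by
  induction ps generalizing s with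
  | nil => simp
  | cons p ps ih =>
      have hp2 : 2 ≤ p := hp p (by simp)
      have hq : ∀ q ∈ PySem.List.pyRange (p * p) limit p, 0 ≤ q := by
        intro q hqm
        have := (PySem.List.mem_pyRange_iff_of_pos (by omega : (0:Int) < p) q).mp hqm
        nlinarith [this.1]
      have hlen : ((PySem.List.pyRange (p * p) limit p).foldl (fun s q => s.set q.toNat false) s).length = s.length :=
        length_foldl_set _ s
      rw [List.foldl_cons, ih _ (fun p' hp' => hp p' (List.mem_cons_of_mem _ hp')) (by omega),
        getD_foldl_set _ s x hq hx]
      by_cases h1 : ∃ p' ∈ ps, (x : Int) ∈ PySem.List.pyRange (p' * p') limit p'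
      · simp [h1]
      · by_cases h2 : (x : Int) ∈ PySem.List.pyRange (p * p) limit p
        · simp [h1, h2]
        · simp [h1, h2]

-- x ≥ 2 has a divisor in [2, x) iff it has one with square ≤ x
lemma divisor_sqrt_iff (x : Int) (hx : 2 ≤ x) :
    (∃ i, 2 ≤ i ∧ i < x ∧ i ∣ x) ↔ (∃ p, 2 ≤ p ∧ p * p ≤ x ∧ p ∣ x) := by
  constructor
  · rintro ⟨i, hi2, hix, d, hd⟩
    by_cases hsq : i * i ≤ x
    · exact ⟨i, hi2, hsq, ⟨d, hd⟩⟩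
    · refine ⟨d, ?_, ?_, ⟨i, by linarith [hd]⟩⟩
      · nlinarith
      · nlinarith
  · rintro ⟨p, hp2, hsq, hdvd⟩
    refine ⟨p, hp2, ?_, hdvd⟩
    rcases hdvd with ⟨d, hd⟩
    nlinarith

-- the sieve entry at x is A's trial-division test at x
lemma sieve_entry_eq (n x : Int) (h2 : 2 ≤ x) (hxl : x < n + 100) :
    (pvSieve n).getD x.toNat true =
    !((PySem.List.pyRange 2 x 1).any (fun i => PySem.Int.mod x i == 0)) := by
  have hx0 : (0:Int) ≤ x := by omega
  rw [Array.getD_eq_getD_getElem?, ← Array.getElem?_toList, ← List.getD_eq_getElem?_getD,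
    pvSieve_toList]
  have hlenR : (List.replicate (n + 100).toNat true).length = (n + 100).toNat := List.length_replicate
  have hxn : x.toNat < (List.replicate (n + 100).toNat true).length := by rw [hlenR]; omega
  rw [getD_sieve_fold _ (n + 100) _ x.toNat
    (fun p hp => ((PySem.List.mem_pyRange_one).mp hp).1) hxn]
  have hcast : ((x.toNat : Int)) = x := Int.toNat_of_nonneg hx0
  have hC : (∃ p ∈ PySem.List.pyRange 2 (n + 100) 1, ((x.toNat : Int)) ∈ PySem.List.pyRange (p * p) (n + 100) p)
      ↔ (∃ i, 2 ≤ i ∧ i < x ∧ i ∣ x) := by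
    rw [hcast, divisor_sqrt_iff x h2]
    constructor
    · rintro ⟨p, hpmem, hxmem⟩
      obtain ⟨hp2, hplim⟩ := (PySem.List.mem_pyRange_one).mp hpmem
      obtain ⟨hle, hlt, hdvd⟩ := (PySem.List.mem_pyRange_iff_of_pos (by omega) x).mp hxmem
      exact ⟨p, hp2, hle, by
        have : p ∣ (x - p * p) + p * p := Dvd.dvd.add hdvd ⟨p, rfl⟩
        simpa using this⟩
    · rintro ⟨p, hp2, hsq, hdvd⟩
      have hplim : p < n + 100 := by nlinarith
      refine ⟨p, (PySem.List.mem_pyRange_one).mpr ⟨hp2, hplim⟩,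
        (PySem.List.mem_pyRange_iff_of_pos (by omega) x).mpr ⟨hsq, hxl, ?_⟩⟩
      exact Int.dvd_sub hdvd ⟨p, rfl⟩
  have hA : ((PySem.List.pyRange 2 x 1).any (fun i => PySem.Int.mod x i == 0) = true)
      ↔ (∃ i, 2 ≤ i ∧ i < x ∧ i ∣ x) := by
    rw [List.any_eq_true]
    constructor
    · rintro ⟨i, hmem, hbeq⟩
      obtain ⟨h1, h2'⟩ := (PySem.List.mem_pyRange_one).mp hmem
      exact ⟨i, h1, h2', (PySem.Int.mod_eq_zero_iff_dvd x i).mp (by simpa using hbeq)⟩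
    · rintro ⟨i, h1, h2', hdvd⟩
      exact ⟨i, (PySem.List.mem_pyRange_one).mpr ⟨h1, h2'⟩,
        by simpa using (PySem.Int.mod_eq_zero_iff_dvd x i).mpr hdvd⟩
  by_cases hc : ∃ i, 2 ≤ i ∧ i < x ∧ i ∣ x
  · rw [if_pos (hC.mpr hc), hA.mpr hc]
    rfl
  · rw [if_neg (fun h => hc (hC.mp h))]
    have hany : ((PySem.List.pyRange 2 x 1).any (fun i => PySem.Int.mod x i == 0)) = false :=
      Bool.eq_false_iff.mpr (fun h => hc (hA.mp h))
    rw [hany, List.getD_eq_getElem?_getD, List.getElem?_replicate]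
    simp [show x.toNat < (n + 100).toNat by omega]

-- ===== VERDICT (by name: the statement is the Claim_ definition above) =====
theorem solution_spec : Claim_equal_solution := by
  intro n _ hpre
  obtain ⟨h0, h1⟩ := hpre
  unfold Spec_solution solution solution_alt
  have hg : ¬ ((decide (n < 0) || decide (n > 10000)) = true) := by
    simp only [Bool.or_eq_true, decide_eq_true_eq]
    omega
  rw [if_neg hg, if_neg hg]
  congr 2
  -- peel x = 1 off A's outer loop
  rw [PySem.List.pyRange_one_cons (by omega : (1:Int) < n + 100), List.foldl_cons,
    if_neg (by omega : ¬ (1:Int) > 1)]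
  rw [show (1:Int) + 1 = 2 from by norm_num]
  -- rewrite A's loop body to an unconditional append on the remaining range
  have hfold := PySem.List.foldl_congr_mem (PySem.List.pyRange 2 (n + 100) 1)
    (fun acc x =>
        if x > 1 then
          if pvTrialLoop x 2 then acc
          else acc ++ PySem.Int.toChars x
        else acc)
    (fun acc x => acc ++ (if ((PySem.List.pyRange 2 x 1).any (fun i => PySem.Int.mod x i == 0)) then [] else PySem.Int.toChars x))
    ([] : List Char)
    (by
      intro acc x hx
      have h2 : 2 ≤ x := ((PySem.List.mem_pyRange_one).mp hx).1
      simp only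
      rw [if_pos (by omega : x > 1), pvTrialLoop_eq_any]
      by_cases h : (PySem.List.pyRange 2 x 1).any (fun i => PySem.Int.mod x i == 0) = true
      · rw [if_pos h, if_pos h, List.append_nil]
      · rw [if_neg h, if_neg h])
  rw [hfold, PySem.List.foldl_append_eq_flatMap, List.nil_append]
  -- B's join is a flatten, a flatten of a filtered map is a flatMap
  rw [join_nil_eq_flatten, flatten_map_filter]
  -- pointwise: the sieve entry is A's trial-division test
  apply congrArg List.flatten
  apply List.map_congr_left
  intro x hx
  obtain ⟨h2, hxl⟩ := (PySem.List.mem_pyRange_one).mp hx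
  rw [show pvKeep (pvSieve n) x = (pvSieve n).getD x.toNat true from rfl,
    sieve_entry_eq n x h2 hxl]
  by_cases h : (PySem.List.pyRange 2 x 1).any (fun i => PySem.Int.mod x i == 0) = true
  · rw [if_pos h, h]
    rfl
  · have hf : (PySem.List.pyRange 2 x 1).any (fun i => PySem.Int.mod x i == 0) = false :=
      Bool.eq_false_iff.mpr h
    rw [if_neg h, hf]
    rfl
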